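-- pv_equiv track=rewrite | github.com/House1904/TEST_GIT | BTString/BT16.py | longest_substring_with_all_characters
-- ===== SOURCE A (Python) =====
-- def longest_substring_with_all_characters(s):
--     unique_characters = set(s)
--     unique_count = len(unique_characters)
--
--     n = len(s)
--     longest_substring = ""
--
--     for i in range(n):
--         current_chars = set()
--         for j in range(i, n):
--             current_chars.add(s[j])
--             if (len(current_chars) == unique_count):
--                 current_substring = s[i:j+1]
--                 if (len(current_substring) > len(longest_substring)):
--                     longest_substring = current_substring
--                 break
--
--     return longest_substring
-- ===== SOURCE B (Python) =====
-- def longest_substring_with_all_characters(s):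
--     # One reverse pass: occ[c] = first index >= i where c occurs; the minimal
--     # window starting at i ends at max(occ.values()) once occ covers all chars.
--     n = len(s)
--     need = len(set(s))
--     occ = {}
--     best = ""
--     for i in range(n - 1, -1, -1):
--         occ[s[i]] = i
--         if len(occ) == need:
--             j = max(occ.values())
--             if j - i + 1 >= len(best):
--                 best = s[i:j + 1]
--     return best
-- ===== Notes on version B (the rewrite author's own statement) =====
-- stated objective: faster
-- what changed: Replaced the nested i/j loops (a fresh set grown per start) by a single right-to-left pass that maintains a first-occurrence-at-or-after-i dict, reading each minimal window end as max(occ.values()).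
import Mathlib
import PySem

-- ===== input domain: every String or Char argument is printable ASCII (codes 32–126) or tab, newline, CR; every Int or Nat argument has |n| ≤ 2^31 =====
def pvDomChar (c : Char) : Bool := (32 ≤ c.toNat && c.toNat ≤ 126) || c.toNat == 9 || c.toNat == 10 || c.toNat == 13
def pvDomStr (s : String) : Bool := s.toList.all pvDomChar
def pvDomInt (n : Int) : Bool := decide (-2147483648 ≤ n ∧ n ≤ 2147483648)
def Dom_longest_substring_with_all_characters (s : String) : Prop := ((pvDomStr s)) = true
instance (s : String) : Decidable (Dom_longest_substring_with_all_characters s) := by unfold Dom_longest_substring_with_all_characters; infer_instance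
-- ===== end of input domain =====

-- B replaces A's nested scans (a fresh set grown per start index) by one right-to-left
-- pass keeping a dict of first occurrences at-or-after i; objective: faster (measured).

-- ===== PORT A =====
-- inner 'for j in range(i, n)' loop: grow current_chars, break when it reaches
-- unique_count, returning the slice s[i:j+1] (accumulated in `taken`); none = no break
def pvInnerA (ucount : Nat) : PySem.Set Char → List Char → List Char → Option (List Char)
  | _, _, [] => none
  | cc, taken, c :: t =>
    let cc' := PySem.Set.add cc c
    let taken' := taken ++ [c]
    if cc'.length = ucount then some taken' else pvInnerA ucount cc' taken' t

-- outer 'for i in range(n)' loop over start positions, i.e. over the suffixes of s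
def pvOuterA (ucount : Nat) : List Char → List Char → List Char
  | longest, [] => longest
  | longest, c :: rest =>
    let longest' :=
      match pvInnerA ucount PySem.Set.empty [] (c :: rest) with
      | some cand => if longest.length < cand.length then cand else longest
      | none => longest
    pvOuterA ucount longest' rest

def longest_substring_with_all_characters (s : String) : String :=
  let l := s.toList
  let ucount := (PySem.Set.ofList l).length
  String.mk (pvOuterA ucount [] l)

-- ===== PORT B =====
-- body of 'for i in range(n-1, -1, -1)': occ[s[i]] = i; if len(occ) == need:
-- j = max(occ.values()); if j-i+1 >= len(best): best = s[i:j+1]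
def pvStepB (l : List Char) (need : Nat) (i : Nat)
    (st : PySem.Dict Char Nat × List Char) : PySem.Dict Char Nat × List Char :=
  let occ := st.1.insert (l.getD i ' ') i
  if occ.size = need then
    match PySem.List.max? occ.values (fun v => v) with
    | some j => if st.2.length ≤ j + 1 - i then (occ, (l.drop i).take (j + 1 - i)) else (occ, st.2)
    | none => (occ, st.2)
  else (occ, st.2)

-- the counted loop: pvLoopB l need m = state after the first m iterations (i = n-1 … n-m)
def pvLoopB (l : List Char) (need : Nat) : Nat → PySem.Dict Char Nat × List Char
  | 0 => (PySem.Dict.empty, [])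
  | m + 1 => pvStepB l need (l.length - m - 1) (pvLoopB l need m)

def longest_substring_with_all_characters_alt (s : String) : String :=
  let l := s.toList
  let need := (PySem.Set.ofList l).length
  String.mk (pvLoopB l need l.length).2

-- ===== PRECONDITION & SPEC =====
def Spec_longest_substring_with_all_characters (s : String) (out : String) : Prop := out = longest_substring_with_all_characters_alt s
instance (s : String) (out : String) : Decidable (Spec_longest_substring_with_all_characters s out) := by unfold Spec_longest_substring_with_all_characters; infer_instance

-- ===== CLAIM (what is proved, stated in full; the proofs are below) =====
def Claim_equal_longest_substring_with_all_characters : Prop := ∀ (s : String), Dom_longest_substring_with_all_characters s → Spec_longest_substring_with_all_characters s (longest_substring_with_all_characters s)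

-- ===== LEMMAS AND PROOFS =====

-- length of the minimal covering prefix, as A's inner loop computes it
def covLen (ucount : Nat) (cc : PySem.Set Char) : List Char → Option Nat
  | [] => none
  | c :: t =>
    let cc' := PySem.Set.add cc c
    if cc'.length = ucount then some 1 else (covLen ucount cc' t).map (· + 1)

-- the same recursion with the accumulated set abstracted to a Finset
def covF (ucount : Nat) (acc : Finset Char) : List Char → Option Nat
  | [] => none
  | c :: t =>
    if (insert c acc).card = ucount then some 1 else (covF ucount (insert c acc) t).map (· + 1)

-- the per-start-position candidate both programs agree on
def candStr (ucount : Nat) (u : List Char) : Option (List Char) :=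
  (covF ucount ∅ u).map (fun m => u.take m)

def stepGT (acc : List Char) (c : Option (List Char)) : List Char :=
  match c with
  | some v => if acc.length < v.length then v else acc
  | none => acc

def stepGE (c : Option (List Char)) (acc : List Char) : List Char :=
  match c with
  | some v => if acc.length ≤ v.length then v else acc
  | none => acc

def suffixes : List Char → List (List Char)
  | [] => []
  | c :: t => (c :: t) :: suffixes t

theorem covLen_eq_covF (ucount : Nat) (cc : List Char) (u : List Char) (h : cc.Nodup) :
    covLen ucount cc u = covF ucount cc.toFinset u := by
  induction u generalizing cc with
  | nil => rfl
  | cons c t ih =>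
    by_cases hc : c ∈ cc
    · have hadd : PySem.Set.add cc c = cc := PySem.Set.add_of_mem hc
      have hins : insert c cc.toFinset = cc.toFinset :=
        Finset.insert_eq_self.mpr (List.mem_toFinset.mpr hc)
      simp only [covLen, covF, hadd, hins, List.toFinset_card_of_nodup h, ih cc h]
    · have hadd : PySem.Set.add cc c = cc ++ [c] := PySem.Set.add_of_not_mem hc
      have hnd : (cc ++ [c]).Nodup := by
        rw [List.nodup_append]
        refine ⟨h, List.nodup_singleton c, ?_⟩
        intro a ha b hb
        rw [List.mem_singleton] at hb
        subst hb
        exact fun h2 => hc (h2 ▸ ha)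
      have htf : (cc ++ [c]).toFinset = insert c cc.toFinset := by
        ext x; simp
      have hcard : (insert c cc.toFinset).card = (cc ++ [c]).length := by
        rw [Finset.card_insert_of_notMem (by simp [hc]), List.toFinset_card_of_nodup h]
        simp
      simp only [covLen, covF, hadd, hcard, ih _ hnd, htf]

theorem pvInnerA_eq_covLen (ucount : Nat) (cc taken t : List Char) :
    pvInnerA ucount cc taken t = (covLen ucount cc t).map (fun m => taken ++ t.take m) := by
  induction t generalizing cc taken with
  | nil => rfl
  | cons c t ih =>
    simp only [pvInnerA, covLen]
    by_cases hc : (PySem.Set.add cc c).length = ucount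
    · simp [hc]
    · rw [if_neg hc, if_neg hc, ih]
      cases covLen ucount (PySem.Set.add cc c) t with
      | none => simp
      | some m => simp [List.take_succ_cons]

theorem pvInnerA_empty (ucount : Nat) (u : List Char) :
    pvInnerA ucount PySem.Set.empty [] u = candStr ucount u := by
  rw [pvInnerA_eq_covLen,
      covLen_eq_covF ucount (PySem.Set.empty : PySem.Set Char) u List.nodup_nil]
  simp [candStr, PySem.Set.empty]

theorem pvOuterA_eq (ucount : Nat) (acc t : List Char) :
    pvOuterA ucount acc t = List.foldl stepGT acc ((suffixes t).map (candStr ucount)) := by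
  induction t generalizing acc with
  | nil => rfl
  | cons c t ih =>
    simp only [pvOuterA, suffixes, List.map_cons, List.foldl_cons, pvInnerA_empty]
    rw [ih]
    congr 1

theorem fold_gt_eq_fold_ge (cs : List (Option (List Char))) (acc : List Char) :
    List.foldl stepGT acc cs =
      if acc.length < (List.foldr stepGE [] cs).length then List.foldr stepGE [] cs
      else acc := by
  induction cs generalizing acc with
  | nil => simp
  | cons c cs ih =>
    simp only [List.foldl_cons, List.foldr_cons, ih]
    cases c with
    | none => simp [stepGT, stepGE]
    | some v =>
      simp only [stepGT, stepGE]
      split_ifs <;> first | rfl | omega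

theorem covF_none (ucount : Nat) (acc : Finset Char) (u : List Char)
    (h : (acc ∪ u.toFinset).card < ucount) : covF ucount acc u = none := by
  induction u generalizing acc with
  | nil => rfl
  | cons c t ih =>
    have hsub : insert c acc ⊆ acc ∪ (c :: t).toFinset := by
      intro x hx
      rcases Finset.mem_insert.mp hx with rfl | hx
      · simp
      · exact Finset.mem_union_left _ hx
    have hne : (insert c acc).card ≠ ucount :=
      Nat.ne_of_lt (lt_of_le_of_lt (Finset.card_le_card hsub) h)
    have hU : insert c acc ∪ t.toFinset = acc ∪ (c :: t).toFinset := by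
      simp [List.toFinset_cons, Finset.insert_union, Finset.union_insert]
    rw [covF, if_neg hne, ih _ (by rw [hU]; exact h)]
    rfl

theorem covF_some (ucount : Nat) (acc : Finset Char) (u : List Char)
    (h1 : acc.card < ucount) (h2 : (acc ∪ u.toFinset).card = ucount) :
    ∃ m, covF ucount acc u = some m ∧ 1 ≤ m ∧ m ≤ u.length ∧
      (acc ∪ (u.take m).toFinset).card = ucount ∧
      (acc ∪ (u.take (m - 1)).toFinset).card < ucount := by
  induction u generalizing acc with
  | nil => simp at h2; omega
  | cons c t ih =>
    have hU : insert c acc ∪ t.toFinset = acc ∪ (c :: t).toFinset := by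
      simp [List.toFinset_cons, Finset.insert_union, Finset.union_insert]
    by_cases hc : (insert c acc).card = ucount
    · refine ⟨1, by simp [covF, hc], le_refl 1, by simp, ?_, ?_⟩
      · simpa [List.take_succ_cons, Finset.union_singleton] using hc
      · simpa using h1
    · have hsub : insert c acc ⊆ acc ∪ (c :: t).toFinset := by
        intro x hx
        rcases Finset.mem_insert.mp hx with rfl | hx
        · simp
        · exact Finset.mem_union_left _ hx
      have hlt : (insert c acc).card < ucount :=
        lt_of_le_of_ne (le_trans (Finset.card_le_card hsub) (le_of_eq h2)) hc
      obtain ⟨m, hm, hm1, hmle, hcov, hmin⟩ := ih (insert c acc) hlt (by rw [hU]; exact h2)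
      obtain ⟨k, rfl⟩ : ∃ k, m = k + 1 := ⟨m - 1, by omega⟩
      refine ⟨k + 2, ?_, by omega, by simp only [List.length_cons]; omega, ?_, ?_⟩
      · simp [covF, hc, hm]
      · simpa [List.take_succ_cons, List.toFinset_cons, Finset.union_insert,
          Finset.insert_union] using hcov
      · simpa [List.take_succ_cons, List.toFinset_cons, Finset.union_insert,
          Finset.insert_union, Nat.add_sub_cancel] using hmin

theorem ofList_length_eq_card (l : List Char) :
    (PySem.Set.ofList l).length = l.toFinset.card := by
  rw [← List.toFinset_card_of_nodup (PySem.Set.nodup_ofList l)]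
  congr 1
  ext x
  simp [PySem.Set.mem_ofList]

theorem pvLoopB_invariant (l : List Char) (m : Nat) (hm : m ≤ l.length) :
    (∀ c, (pvLoopB l (PySem.Set.ofList l).length m).1.get? c =
        ((l.drop (l.length - m)).findIdx? (fun x => x == c)).map (fun k => k + (l.length - m)))
    ∧ (pvLoopB l (PySem.Set.ofList l).length m).1.keys.Nodup
    ∧ (pvLoopB l (PySem.Set.ofList l).length m).2 =
        List.foldr stepGE []
          ((suffixes (l.drop (l.length - m))).map (candStr (PySem.Set.ofList l).length)) := by
  induction m with
  | zero =>
    refine ⟨fun c => ?_, ?_, ?_⟩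
    · simp [pvLoopB, PySem.Dict.get?_empty, List.drop_length]
    · simp [pvLoopB, PySem.Dict.keys_empty]
    · simp [pvLoopB, List.drop_length, suffixes]
  | succ m ih =>
    obtain ⟨hget, hnd, hbest⟩ := ih (by omega)
    have hi : l.length - (m + 1) < l.length := by omega
    have hisucc : l.length - m = (l.length - (m + 1)) + 1 := by omega
    set i := l.length - (m + 1) with hidef
    set st := pvLoopB l (PySem.Set.ofList l).length m with hst
    have hdrop : l.drop i = l[i] :: l.drop (i + 1) := List.drop_eq_getElem_cons hi
    have hgetD : l.getD i ' ' = l[i] := List.getD_eq_getElem l ' ' hi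
    set occ := st.1.insert l[i] i with hocc
    have hndocc : occ.keys.Nodup := PySem.Dict.nodup_keys_insert st.1 l[i] i hnd
    -- first-occurrence characterisation of occ
    have hG : ∀ c, occ.get? c =
        ((l.drop i).findIdx? (fun x => x == c)).map (fun k => k + i) := by
      intro c
      rw [hocc, PySem.Dict.get?_insert, hdrop, List.findIdx?_cons]
      by_cases hc : c = l[i]
      · subst hc; simp
      · rw [if_neg hc]
        have hbe : (l[i] == c) = false := by
          simp only [beq_eq_false_iff_ne, ne_eq]
          exact fun h => hc h.symm
        rw [hbe]
        simp only [Bool.false_eq_true, if_false]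
        rw [hget c, hisucc]
        cases (l.drop (i + 1)).findIdx? (fun x => x == c) with
        | none => simp
        | some k => simp; omega
    -- keys are exactly the characters of the suffix
    have hkeysiff : ∀ c, c ∈ occ.keys ↔ c ∈ l.drop i := by
      intro c
      constructor
      · intro hk
        by_contra hmem
        have hnone : occ.get? c = none := by
          rw [hG c]
          have : (l.drop i).findIdx? (fun x => x == c) = none :=
            List.findIdx?_eq_none_iff.mpr (fun x hx => by
              simp only [beq_eq_false_iff_ne, ne_eq]
              exact fun h => hmem (h ▸ hx))
          simp [this]
        exact ((PySem.Dict.get?_eq_none_iff_not_mem_keys occ c).mp hnone) hk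
      · intro hmem
        by_contra hk
        have hnone : occ.get? c = none :=
          (PySem.Dict.get?_eq_none_iff_not_mem_keys occ c).mpr hk
        rw [hG c] at hnone
        cases hf : (l.drop i).findIdx? (fun x => x == c) with
        | none =>
          have := List.findIdx?_eq_none_iff.mp hf c hmem
          simp at this
        | some k => rw [hf] at hnone; simp at hnone
    have hsize : occ.size = (l.drop i).toFinset.card := by
      have h1 : occ.size = occ.keys.length := by
        simp [PySem.Dict.size, PySem.Dict.keys]
      have h2 : occ.keys.toFinset = (l.drop i).toFinset := by
        ext c; simp [hkeysiff c]
      rw [h1, ← List.toFinset_card_of_nodup hndocc, h2]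
    have hneed : (PySem.Set.ofList l).length = l.toFinset.card := ofList_length_eq_card l
    -- one unfolded step
    have hstep : pvLoopB l (PySem.Set.ofList l).length (m + 1) =
        pvStepB l (PySem.Set.ofList l).length i st := rfl
    have hsfx : suffixes (l.drop i) = (l.drop i) :: suffixes (l.drop (i + 1)) := by
      rw [hdrop]
      simp [suffixes]
    by_cases hcov : (l.drop i).toFinset.card = l.toFinset.card
    · -- the suffix still contains every character: a candidate is recorded
      have hsz : occ.size = (PySem.Set.ofList l).length := by rw [hsize, hneed, hcov]
      have hlpos : 0 < l.toFinset.card := by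
        refine Finset.card_pos.mpr ⟨l[i], List.mem_toFinset.mpr (l.getElem_mem hi)⟩
      obtain ⟨m', hsome, hm1, hmle, hcovm, hmin⟩ :=
        covF_some (PySem.Set.ofList l).length ∅ (l.drop i)
          (by rw [hneed]; simpa using hlpos)
          (by rw [hneed, ← hcov]; simp)
      simp only [Finset.empty_union] at hcovm hmin
      have htakeF : ((l.drop i).take m').toFinset = (l.drop i).toFinset := by
        apply Finset.eq_of_subset_of_card_le
        · intro x hx
          exact List.mem_toFinset.mpr (List.take_subset _ _ (List.mem_toFinset.mp hx))
        · rw [hcovm, hneed, hcov]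
      -- every stored first occurrence is ≤ i + (m' - 1)
      have hvle : ∀ v ∈ occ.values, v ≤ i + (m' - 1) := by
        intro v hv
        obtain ⟨c, hcq⟩ : ∃ c, occ.get? c = some v := by
          rw [PySem.Dict.values_eq_map_keys occ hndocc 0] at hv
          obtain ⟨c, hck, rfl⟩ := List.mem_map.mp hv
          refine ⟨c, ?_⟩
          have hsomec : (occ.get? c).isSome := by
            rw [← PySem.Dict.contains_eq_isSome_get?]
            exact (PySem.Dict.contains_iff_mem_keys occ c).mpr hck
          rw [PySem.Dict.getD_eq_get?_getD]
          cases hq : occ.get? c with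
          | none => rw [hq] at hsomec; simp at hsomec
          | some w => simp
        rw [hG c] at hcq
        cases hf : (l.drop i).findIdx? (fun x => x == c) with
        | none => rw [hf] at hcq; simp at hcq
        | some k =>
          rw [hf] at hcq
          simp only [Option.map_some, Option.some.injEq] at hcq
          obtain ⟨hklen, hpk, hmink⟩ := List.findIdx?_eq_some_iff_getElem.mp hf
          have hc_mem : c ∈ (l.drop i).take m' := by
            have : c ∈ l.drop i := by
              have := List.getElem_mem hklen
              rwa [eq_of_beq hpk] at this
            exact List.mem_toFinset.mp (htakeF ▸ List.mem_toFinset.mpr this)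
          obtain ⟨pos, hposlen, hposc⟩ := List.mem_iff_getElem.mp hc_mem
          have hposlt : pos < m' := by
            have := hposlen
            simp only [List.length_take] at this
            omega
          have hkpos : k ≤ pos := by
            by_contra hkp
            have hposl : pos < (l.drop i).length := by
              have : m' ≤ (l.drop i).length := hmle
              omega
            have := hmink pos (by omega)
            rw [List.getElem_take] at hposc
            simp [hposc] at this
          omega
      -- i + (m' - 1) is a stored first occurrence (of the character completing the cover)
      have hm'len : m' - 1 < (l.drop i).length := by omega
      have hvmem : i + (m' - 1) ∈ occ.values := by
        have hnotin : ((l.drop i)[m' - 1] == (l.drop i)[m' - 1]) = true := by simp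
        have hfirst : ∀ j (hj : j < m' - 1),
            ((l.drop i)[j]'(by omega) == (l.drop i)[m' - 1]) = false := by
          intro j hj
          simp only [beq_eq_false_iff_ne, ne_eq]
          intro hEq
          -- (l.drop i)[m'-1] would then already lie in take (m'-1), making its
          -- char-set equal to that of take m', contradicting hmin < hcovm
          have hmemt : (l.drop i)[m' - 1] ∈ (l.drop i).take (m' - 1) := by
            rw [← hEq]
            rw [List.mem_iff_getElem]
            exact ⟨j, by simp only [List.length_take]; omega, List.getElem_take⟩
          have htm : (l.drop i).take m' = (l.drop i).take (m' - 1) ++ [(l.drop i)[m' - 1]] := by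
            have hm'e : m' = (m' - 1) + 1 := by omega
            conv_lhs => rw [hm'e]
            exact List.take_succ_eq_append_getElem hm'len
          have : ((l.drop i).take m').toFinset = ((l.drop i).take (m' - 1)).toFinset := by
            rw [htm]
            ext x
            simp only [List.toFinset_append, Finset.mem_union, List.mem_toFinset,
              List.mem_singleton]
            constructor
            · rintro (hx | rfl)
              · exact hx
              · exact hmemt
            · exact fun hx => Or.inl hx
          rw [← hcovm, this] at hmin
          omega
        have hfind : (l.drop i).findIdx? (fun x => x == (l.drop i)[m' - 1]) = some (m' - 1) :=
          List.findIdx?_eq_some_iff_getElem.mpr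
            ⟨hm'len, hnotin, fun j hj => by simp only [hfirst j hj, Bool.false_eq_true,
              not_false_eq_true]⟩
        have hgd : occ.get? ((l.drop i)[m' - 1]) = some ((m' - 1) + i) := by
          rw [hG, hfind]; rfl
        have hitems := PySem.Dict.mem_items_of_get?_eq_some occ hgd
        have : (m' - 1) + i ∈ occ.values := by
          simp only [PySem.Dict.values]
          exact List.mem_map.mpr ⟨_, hitems, rfl⟩
        rwa [Nat.add_comm] at this
      obtain ⟨j, hj⟩ : ∃ j, PySem.List.max? occ.values (fun v => v) = some j := by
        cases hq : PySem.List.max? occ.values (fun v => v) with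
        | none =>
          rw [(PySem.List.max?_eq_none_iff occ.values (fun v => v)).mp hq] at hvmem
          simp at hvmem
        | some j => exact ⟨j, rfl⟩
      have hjeq : j = i + (m' - 1) :=
        le_antisymm (hvle j (PySem.List.max?_mem hj)) (PySem.List.max?_isMax hj _ hvmem)
      have hj1 : j + 1 - i = m' := by omega
      -- now compute the step on both sides
      refine ⟨?_, ?_, ?_⟩
      · intro c
        rw [hstep]
        simp only [pvStepB, hgetD, ← hocc, if_pos hsz, hj]
        rw [show (if st.2.length ≤ j + 1 - i then (occ, (l.drop i).take (j + 1 - i))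
              else (occ, st.2)).1 = occ from by split <;> rfl]
        exact hG c
      · rw [hstep]
        simp only [pvStepB, hgetD, ← hocc, if_pos hsz, hj]
        rw [show (if st.2.length ≤ j + 1 - i then (occ, (l.drop i).take (j + 1 - i))
              else (occ, st.2)).1 = occ from by split <;> rfl]
        exact hndocc
      · rw [hstep]
        simp only [pvStepB, hgetD, ← hocc, if_pos hsz, hj]
        rw [hsfx]
        simp only [List.map_cons, List.foldr_cons]
        rw [← hisucc, ← hbest]
        have hcand : candStr (PySem.Set.ofList l).length (l.drop i) =
            some ((l.drop i).take m') := by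
          simp [candStr, hsome]
        rw [hcand]
        simp only [stepGE]
        have hlt : ((l.drop i).take m').length = m' := by
          simp only [List.length_take]
          omega
        rw [hj1, hlt]
        split_ifs <;> rfl
    · -- some character is missing from the suffix: no candidate on either side
      have hszne : occ.size ≠ (PySem.Set.ofList l).length := by
        rw [hsize, hneed]
        exact hcov
      have hcardlt : (l.drop i).toFinset.card < l.toFinset.card := by
        refine lt_of_le_of_ne (Finset.card_le_card ?_) hcov
        intro x hx
        exact List.mem_toFinset.mpr (List.mem_of_mem_drop (List.mem_toFinset.mp hx))
      have hnonecand : candStr (PySem.Set.ofList l).length (l.drop i) = none := by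
        rw [candStr, covF_none _ _ _ (by rw [hneed]; simpa using hcardlt)]
        rfl
      refine ⟨?_, ?_, ?_⟩
      · intro c
        rw [hstep]
        simp only [pvStepB, hgetD, ← hocc, if_neg hszne]
        exact hG c
      · rw [hstep]
        simp only [pvStepB, hgetD, ← hocc, if_neg hszne]
        exact hndocc
      · rw [hstep]
        simp only [pvStepB, hgetD, ← hocc, if_neg hszne]
        rw [hsfx]
        simp only [List.map_cons, List.foldr_cons, hnonecand, stepGE]
        rw [← hisucc]
        exact hbest

-- ===== VERDICT (by name: the statement is the Claim_ definition above) =====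
theorem longest_substring_with_all_characters_spec : Claim_equal_longest_substring_with_all_characters := by
  intro s _
  show longest_substring_with_all_characters s = longest_substring_with_all_characters_alt s
  show String.mk (pvOuterA (PySem.Set.ofList s.toList).length [] s.toList) =
    String.mk (pvLoopB s.toList (PySem.Set.ofList s.toList).length s.toList.length).2
  obtain ⟨-, -, hbest⟩ := pvLoopB_invariant s.toList s.toList.length le_rfl
  simp only [Nat.sub_self, List.drop_zero] at hbest
  rw [hbest, pvOuterA_eq, fold_gt_eq_fold_ge]
  cases h : List.foldr stepGE []
      ((suffixes s.toList).map (candStr (PySem.Set.ofList s.toList).length)) with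
  | nil => simp
  | cons a r => simp
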